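-- pv_equiv track=rewrite | github.com/nagarjuna-gangadhari/serve-beta | evd/student/views.py | calculateTimeRemainingPerDay
-- ===== SOURCE A (Python) =====
-- def calculateTimeRemainingPerDay(slots,endTime):
--     foundSlot = False
--     timeRemaining = 0
--     for j in range(len(slots)):
--         aSlot = slots[j]
--         sTime = aSlot["startTimeMin"]
--         eTime = aSlot["endTimeMin"]
--         if endTime >= sTime and endTime <= eTime:
--             foundSlot = True
--             timeRemaining =  eTime - endTime
--         elif foundSlot == True:
--             timeRemaining = timeRemaining + (eTime - sTime)
--     return timeRemaining
-- ===== SOURCE B (Python) =====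
-- def calculateTimeRemainingPerDay(slots, endTime):
--     # Walk the slots back-to-front, accumulating durations of slots after the
--     # current one; stop at the first match from the end (= A's last match).
--     after = 0
--     for aSlot in reversed(slots):
--         sTime = aSlot["startTimeMin"]
--         eTime = aSlot["endTimeMin"]
--         if sTime <= endTime <= eTime:
--             return (eTime - endTime) + after
--         after += eTime - sTime
--     return 0
-- ===== Notes on version B (the rewrite author's own statement) =====
-- stated objective: alternative
-- what changed: B scans the slots back-to-front with an early return at the first match from the end (A's last match), accumulating later-slot durations along the way, instead of A's forward pass with a found-flag and reset-on-match accumulator.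
import Mathlib
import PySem

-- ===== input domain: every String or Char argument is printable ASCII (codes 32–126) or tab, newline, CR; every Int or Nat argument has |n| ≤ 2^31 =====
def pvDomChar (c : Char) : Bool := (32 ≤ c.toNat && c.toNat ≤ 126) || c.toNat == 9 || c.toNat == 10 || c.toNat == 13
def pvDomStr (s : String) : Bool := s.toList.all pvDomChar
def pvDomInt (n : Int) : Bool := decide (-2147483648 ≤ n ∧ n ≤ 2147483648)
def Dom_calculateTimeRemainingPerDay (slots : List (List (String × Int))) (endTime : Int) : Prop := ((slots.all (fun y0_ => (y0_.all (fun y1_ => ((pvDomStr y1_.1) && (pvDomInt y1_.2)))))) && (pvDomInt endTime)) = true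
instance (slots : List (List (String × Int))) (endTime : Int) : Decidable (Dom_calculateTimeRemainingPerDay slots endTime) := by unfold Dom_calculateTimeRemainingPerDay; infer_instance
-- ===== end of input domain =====

-- B scans the slots back-to-front with an early return at the first match from
-- the end, instead of A's forward pass with a found-flag and reset accumulator.

-- ===== PORT A =====
-- A's loop step: state (foundSlot, timeRemaining).  aSlot["k"] is a first-match
-- association-list lookup; a missing key is a Python KeyError, excluded by Pre_
-- (the 'none' branch leaves the state unchanged there).
def pvStepA (endTime : Int) (st : Bool × Int) (aSlot : List (String × Int)) : Bool × Int :=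
  match aSlot.lookup "startTimeMin", aSlot.lookup "endTimeMin" with
  | some sTime, some eTime =>
    if endTime ≥ sTime ∧ endTime ≤ eTime then (true, eTime - endTime)
    else if st.1 = true then (st.1, st.2 + (eTime - sTime))
    else st
  | _, _ => st

def calculateTimeRemainingPerDay (slots : List (List (String × Int))) (endTime : Int) : Int :=
  (slots.foldl (pvStepA endTime) (false, 0)).2

-- ===== PORT B =====
-- B's loop over reversed(slots) with accumulator 'after' and early return; a
-- missing key (KeyError in Python, outside Pre_) just skips the slot here.
def pvGoB (endTime : Int) : List (List (String × Int)) → Int → Int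
  | [], _ => 0
  | aSlot :: rest, after =>
    match aSlot.lookup "startTimeMin", aSlot.lookup "endTimeMin" with
    | some sTime, some eTime =>
      if sTime ≤ endTime ∧ endTime ≤ eTime then (eTime - endTime) + after
      else pvGoB endTime rest (after + (eTime - sTime))
    | _, _ => pvGoB endTime rest after

def calculateTimeRemainingPerDay_alt (slots : List (List (String × Int))) (endTime : Int) : Int :=
  pvGoB endTime slots.reverse 0

-- ===== PRECONDITION & SPEC =====
-- Pre_ excludes exactly the inputs where A raises KeyError: some slot lacks
-- the key "startTimeMin" or "endTimeMin".
def Pre_calculateTimeRemainingPerDay (slots : List (List (String × Int))) (endTime : Int) : Prop :=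
  ∀ aSlot ∈ slots, (aSlot.lookup "startTimeMin").isSome ∧ (aSlot.lookup "endTimeMin").isSome

instance (slots : List (List (String × Int))) (endTime : Int) : Decidable (Pre_calculateTimeRemainingPerDay slots endTime) := by
  unfold Pre_calculateTimeRemainingPerDay; infer_instance

def pvWitness_calculateTimeRemainingPerDay : (List (List (String × Int))) × Int :=
  ([[("startTimeMin", 0), ("endTimeMin", 60)], [("startTimeMin", 90), ("endTimeMin", 120)]], 30)

def Spec_calculateTimeRemainingPerDay (slots : List (List (String × Int))) (endTime : Int) (out : Int) : Prop := out = calculateTimeRemainingPerDay_alt slots endTime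
instance (slots : List (List (String × Int))) (endTime : Int) (out : Int) : Decidable (Spec_calculateTimeRemainingPerDay slots endTime out) := by unfold Spec_calculateTimeRemainingPerDay; infer_instance

-- ===== CLAIM (what is proved, stated in full; the proofs are below) =====
def Claim_equal_calculateTimeRemainingPerDay : Prop := ∀ (slots : List (List (String × Int))) (endTime : Int), Dom_calculateTimeRemainingPerDay slots endTime → Pre_calculateTimeRemainingPerDay slots endTime → Spec_calculateTimeRemainingPerDay slots endTime (calculateTimeRemainingPerDay slots endTime)

-- ===== LEMMAS AND PROOFS =====

-- Core invariant, by snoc induction: for a keyed list l with A-fold result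
-- (f, t) from (false, 0):  pvGoB on l.reverse with any 'after' is
-- 'if f then t + after else 0', and f = false forces t = 0.
theorem pvKey (endTime : Int) (l : List (List (String × Int)))
    (hk : ∀ aSlot ∈ l, (aSlot.lookup "startTimeMin").isSome ∧ (aSlot.lookup "endTimeMin").isSome) :
    (∀ after : Int, pvGoB endTime l.reverse after =
      if (l.foldl (pvStepA endTime) (false, 0)).1
      then (l.foldl (pvStepA endTime) (false, 0)).2 + after else 0) ∧
    ((l.foldl (pvStepA endTime) (false, 0)).1 = false →
      (l.foldl (pvStepA endTime) (false, 0)).2 = 0) := by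
  induction l using List.reverseRecOn with
  | nil => simp [pvGoB]
  | append_singleton l x ih =>
    have hx : x ∈ l ++ [x] := by simp
    obtain ⟨hs, he⟩ := hk x hx
    obtain ⟨sTime, hs⟩ := Option.isSome_iff_exists.mp hs
    obtain ⟨eTime, he⟩ := Option.isSome_iff_exists.mp he
    have hk' : ∀ aSlot ∈ l, (aSlot.lookup "startTimeMin").isSome ∧ (aSlot.lookup "endTimeMin").isSome := by
      intro a ha; exact hk a (by simp [ha])
    obtain ⟨ih1, ih2⟩ := ih hk'
    have hfold : (l ++ [x]).foldl (pvStepA endTime) (false, 0) =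
        pvStepA endTime (l.foldl (pvStepA endTime) (false, 0)) x := by
      simp [List.foldl_append]
    have hrev : (l ++ [x]).reverse = x :: l.reverse := by simp
    rw [hfold, hrev]
    set st := l.foldl (pvStepA endTime) (false, 0) with hst
    by_cases hm : endTime ≥ sTime ∧ endTime ≤ eTime
    · constructor
      · intro after
        simp only [pvGoB, hs, he]
        rw [if_pos ⟨hm.1, hm.2⟩]
        simp [pvStepA, hs, he, if_pos hm]
      · intro h
        simp [pvStepA, hs, he, if_pos hm] at h
    · have hm' : ¬ (sTime ≤ endTime ∧ endTime ≤ eTime) := by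
        intro h; exact hm ⟨h.1, h.2⟩
      constructor
      · intro after
        simp only [pvGoB, hs, he]
        rw [if_neg hm']
        rw [ih1]
        by_cases hf : st.1
        · simp [pvStepA, hs, he, if_neg hm, hf]; ring
        · simp only [Bool.not_eq_true] at hf
          simp [pvStepA, hs, he, if_neg hm, hf]
      · intro h
        by_cases hf : st.1
        · simp [pvStepA, hs, he, if_neg hm, hf] at h
        · simp only [Bool.not_eq_true] at hf
          have := ih2 hf
          simp [pvStepA, hs, he, if_neg hm, hf, this]

-- ===== VERDICT (by name: the statement is the Claim_ definition above) =====
theorem calculateTimeRemainingPerDay_spec : Claim_equal_calculateTimeRemainingPerDay := by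
  intro slots endTime _ hpre
  obtain ⟨h1, h2⟩ := pvKey endTime slots hpre
  unfold Spec_calculateTimeRemainingPerDay calculateTimeRemainingPerDay calculateTimeRemainingPerDay_alt
  rw [h1 0]
  by_cases hf : (slots.foldl (pvStepA endTime) (false, 0)).1
  · simp [hf]
  · simp only [Bool.not_eq_true] at hf
    simp [hf, h2 hf]
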